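-- pv_equiv track=rewrite | github.com/sarthak-opash/AI-ML-Internship | CNN_Core/OCR/licence_plate_detection.py | correct_format
-- ===== SOURCE A (Python) =====
-- dict_char_to_int = {'O': '0', 'I': '1', 'Z': '2', 'S': '5', 'B': '8'}
--
-- dict_int_to_char = {'0': 'O', '1': 'I', '2': 'Z', '5': 'S', '8': 'B'}
--
-- def correct_format(text):
--     if len(text) != 7: return None
--     res = ""
--     for i in range(7):
--         char = text[i]
--         if i in [0, 1, 4, 5, 6]:
--             res += dict_int_to_char.get(char, char) if char.isdigit() else char
--         else:
--             res += dict_char_to_int.get(char, char) if not char.isdigit() else char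
--     return res
-- ===== SOURCE B (Python) =====
-- dict_char_to_int = {'O': '0', 'I': '1', 'Z': '2', 'S': '5', 'B': '8'}
--
-- dict_int_to_char = {'0': 'O', '1': 'I', '2': 'Z', '5': 'S', '8': 'B'}
--
-- _TO_CHAR = str.maketrans(dict_int_to_char)
-- _TO_INT = str.maketrans(dict_char_to_int)
--
-- def correct_format(text):
--     if len(text) != 7:
--         return None
--     return (text[0:2].translate(_TO_CHAR)
--             + text[2:4].translate(_TO_INT)
--             + text[4:7].translate(_TO_CHAR))
-- ===== Notes on version B (the rewrite author's own statement) =====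
-- stated objective: idiomatic
-- what changed: Replaced the indexed loop with per-position dict lookups and isdigit guards by two str.maketrans translation tables applied to three slices (letter-prefix, digit-middle, letter-suffix), concatenated; the tables' keys being exactly digits/letters makes the isdigit guards unnecessary.
import Mathlib
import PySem

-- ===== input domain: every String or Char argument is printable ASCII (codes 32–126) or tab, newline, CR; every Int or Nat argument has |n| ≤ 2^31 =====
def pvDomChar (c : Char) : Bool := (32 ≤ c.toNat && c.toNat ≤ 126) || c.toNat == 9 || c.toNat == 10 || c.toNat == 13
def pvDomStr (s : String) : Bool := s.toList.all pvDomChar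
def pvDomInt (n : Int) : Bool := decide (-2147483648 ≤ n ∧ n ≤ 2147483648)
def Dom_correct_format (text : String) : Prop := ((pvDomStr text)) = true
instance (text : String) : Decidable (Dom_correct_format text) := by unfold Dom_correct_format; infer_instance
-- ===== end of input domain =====

-- B replaces A's indexed loop with per-position isdigit guards by translation maps applied to three slices (idiomatic; same cost).

-- ===== PORT A =====
def dict_char_to_int : PySem.Dict Char Char :=
  PySem.Dict.ofList [('O', '0'), ('I', '1'), ('Z', '2'), ('S', '5'), ('B', '8')]

def dict_int_to_char : PySem.Dict Char Char :=
  PySem.Dict.ofList [('0', 'O'), ('1', 'I'), ('2', 'Z'), ('5', 'S'), ('8', 'B')]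

def correct_format (text : String) : Option String :=
  let cs := text.toList
  if cs.length ≠ 7 then none
  else
    let res := (PySem.List.pyRange 0 7 1).foldl (fun res i =>
      let char := PySem.List.pyGetD cs i ' '   -- text[i]: always in range under the length-7 guard
      if ([0, 1, 4, 5, 6] : List Int).contains i then
        res ++ [if PySem.Chars.isdigit char then dict_int_to_char.getD char char else char]
      else
        res ++ [if !(PySem.Chars.isdigit char) then dict_char_to_int.getD char char else char]) []
    some (String.ofList res)

-- ===== PORT B =====
-- str.translate with a maketrans table = map each char through the dict, identity on missing keys
def pvToChar (c : Char) : Char := dict_int_to_char.getD c c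
def pvToInt (c : Char) : Char := dict_char_to_int.getD c c

def correct_format_alt (text : String) : Option String :=
  let cs := text.toList
  if cs.length ≠ 7 then none
  else
    some (String.ofList ((PySem.List.slice cs (some 0) (some 2)).map pvToChar
      ++ (PySem.List.slice cs (some 2) (some 4)).map pvToInt
      ++ (PySem.List.slice cs (some 4) (some 7)).map pvToChar))

-- ===== PRECONDITION & SPEC =====
def Spec_correct_format (text : String) (out : Option String) : Prop := out = correct_format_alt text
instance (text : String) (out : Option String) : Decidable (Spec_correct_format text out) := by unfold Spec_correct_format; infer_instance

-- ===== CLAIM (what is proved, stated in full; the proofs are below) =====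
def Claim_equal_correct_format : Prop := ∀ (text : String), Dom_correct_format text → Spec_correct_format text (correct_format text)

-- ===== LEMMAS AND PROOFS =====

lemma int_to_char_items :
    dict_int_to_char = PySem.Dict.mk [('0', 'O'), ('1', 'I'), ('2', 'Z'), ('5', 'S'), ('8', 'B')] := by
  decide

lemma char_to_int_items :
    dict_char_to_int = PySem.Dict.mk [('O', '0'), ('I', '1'), ('Z', '2'), ('S', '5'), ('B', '8')] := by
  decide

-- the int→char table's keys are all digits, so it fixes every non-digit
lemma toChar_nondigit (c : Char) (h : PySem.Chars.isdigit c = false) :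
    dict_int_to_char.getD c c = c := by
  rw [int_to_char_items]
  simp only [PySem.Dict.getD, PySem.Dict.get?_mk_cons]
  split_ifs with h0 h1 h2 h3 h4 <;> simp_all [PySem.Dict.get?] <;> subst_vars <;>
    exact absurd h (by decide)

-- the char→int table's keys are all letters, so it fixes every digit
lemma toInt_digit (c : Char) (h : PySem.Chars.isdigit c = true) :
    dict_char_to_int.getD c c = c := by
  rw [char_to_int_items]
  simp only [PySem.Dict.getD, PySem.Dict.get?_mk_cons]
  split_ifs with h0 h1 h2 h3 h4 <;> simp_all [PySem.Dict.get?] <;> subst_vars <;>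
    exact absurd h (by decide)

lemma guardChar_eq (c : Char) :
    (if PySem.Chars.isdigit c then dict_int_to_char.getD c c else c) = pvToChar c := by
  unfold pvToChar
  by_cases h : PySem.Chars.isdigit c
  · simp [h]
  · simp only [Bool.not_eq_true] at h
    simp [h, toChar_nondigit c h]

lemma guardInt_eq (c : Char) :
    (if !(PySem.Chars.isdigit c) then dict_char_to_int.getD c c else c) = pvToInt c := by
  unfold pvToInt
  by_cases h : PySem.Chars.isdigit c
  · simp [h, toInt_digit c h]
  · simp [h]

lemma len7_exists {α : Type} (xs : List α) (h : xs.length = 7) :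
    ∃ a b c d e f g, xs = [a, b, c, d, e, f, g] := by
  rcases xs with _ | ⟨a, _ | ⟨b, _ | ⟨c, _ | ⟨d, _ | ⟨e, _ | ⟨f, _ | ⟨g, _ | ⟨x, t⟩⟩⟩⟩⟩⟩⟩⟩ <;> simp_all

lemma pyRange07 : PySem.List.pyRange 0 7 1 = [0, 1, 2, 3, 4, 5, 6] := by decide

-- ===== VERDICT (by name: the statement is the Claim_ definition above) =====
set_option maxRecDepth 4000 in
theorem correct_format_spec : Claim_equal_correct_format := by
  intro text _
  unfold Spec_correct_format correct_format correct_format_alt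
  by_cases h : text.toList.length = 7
  · obtain ⟨a, b, c, d, e, f, g, hcs⟩ := len7_exists text.toList h
    simp only [hcs, pyRange07, List.foldl_cons, List.foldl_nil, PySem.List.pyGetD_ofNat']
    have k0 : ([0, 1, 4, 5, 6] : List Int).contains 0 = true := by decide
    have k1 : ([0, 1, 4, 5, 6] : List Int).contains 1 = true := by decide
    have k2 : ([0, 1, 4, 5, 6] : List Int).contains 2 = false := by decide
    have k3 : ([0, 1, 4, 5, 6] : List Int).contains 3 = false := by decide
    have k4 : ([0, 1, 4, 5, 6] : List Int).contains 4 = true := by decide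
    have k5 : ([0, 1, 4, 5, 6] : List Int).contains 5 = true := by decide
    have k6 : ([0, 1, 4, 5, 6] : List Int).contains 6 = true := by decide
    simp only [k0, k1, k2, k3, k4, k5, k6, if_true, if_false, Bool.false_eq_true,
      List.getD, List.nil_append, guardChar_eq, guardInt_eq]
    norm_num [PySem.List.slice, PySem.List.clampIdx,
      show (2 : Int).toNat = 2 from rfl, show (4 : Int).toNat = 4 from rfl,
      show (7 : Int).toNat = 7 from rfl,
      List.take_succ_cons, List.take_zero, List.drop_succ_cons]
  · have h' : ¬ text.length = 7 := by simpa using h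
    simp [h']
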